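-- pv_equiv track=rewrite | github.com/nicepyprod/csv-surgeon | csv_surgeon/truncate.py | truncate_columns
-- ===== SOURCE A (Python) =====
-- from typing import Iterator, Dict, List, Optional
--
-- def truncate_columns(
--     rows: Iterator[Dict[str, str]],
--     columns: List[str],
--     max_length: int,
--     suffix: str = "",
-- ) -> Iterator[Dict[str, str]]:
--     """Apply truncation to multiple columns."""
--     if max_length < 0:
--         raise ValueError("max_length must be >= 0")
--     for row in rows:
--         row = dict(row)
--         for col in columns:
--             if col in row:
--                 val = row[col]
--                 if len(val) > max_length:
--                     core = max_length - len(suffix)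
--                     row[col] = val[:max(core, 0)] + suffix
--         yield row
-- ===== SOURCE B (Python) =====
-- def truncate_columns(rows, columns, max_length, suffix=""):
--     """Apply truncation to multiple columns (dict-comprehension over row items)."""
--     if max_length < 0:
--         raise ValueError("max_length must be >= 0")
--     col_set = set(columns)
--     keep = max(max_length - len(suffix), 0)
--     for row in rows:
--         yield {
--             k: v[:keep] + suffix if k in col_set and len(v) > max_length else v
--             for k, v in row.items()
--         }
-- ===== Notes on version B (the rewrite author's own statement) =====
-- stated objective: faster
-- what changed: Instead of copying each row's dict and probing/mutating it once per requested column, B precomputes the column set and the keep length once and builds each output row with a single dict comprehension over the row's items, so the per-row work no longer scans the columns list.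
import Mathlib
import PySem

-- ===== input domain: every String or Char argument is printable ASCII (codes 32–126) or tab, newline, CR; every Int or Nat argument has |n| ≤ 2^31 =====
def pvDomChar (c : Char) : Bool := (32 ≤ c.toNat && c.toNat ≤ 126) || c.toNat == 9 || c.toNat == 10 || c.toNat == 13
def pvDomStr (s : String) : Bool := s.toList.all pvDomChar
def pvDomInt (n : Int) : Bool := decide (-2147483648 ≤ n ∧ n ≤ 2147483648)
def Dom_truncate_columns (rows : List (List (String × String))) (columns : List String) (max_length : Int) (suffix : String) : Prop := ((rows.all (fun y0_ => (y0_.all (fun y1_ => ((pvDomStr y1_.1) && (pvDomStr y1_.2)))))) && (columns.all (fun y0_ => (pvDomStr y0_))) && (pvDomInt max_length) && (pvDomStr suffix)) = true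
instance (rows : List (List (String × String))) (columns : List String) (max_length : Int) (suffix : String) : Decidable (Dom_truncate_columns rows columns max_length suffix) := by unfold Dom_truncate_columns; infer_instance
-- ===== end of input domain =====

-- B replaces A's per-column probing/mutation of a dict copy by a single dict-comprehension pass over
-- each row's items with a precomputed column set, removing the per-row scan of the columns list (faster).


-- ===== PORT A =====
-- A: generator; per row copy the dict, then for each requested column truncate in place.
def truncate_columns (rows : List (List (String × String))) (columns : List String) (max_length : Int) (suffix : String) : List (List (String × String)) :=
  rows.map (fun row =>
    (columns.foldl (fun d col =>
      match PySem.Dict.get? d col with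
      | some val =>
          if PySem.Str.len val > max_length then
            let core := max_length - PySem.Str.len suffix
            PySem.Dict.insert d col (PySem.Str.slice val none (some (max core 0)) ++ suffix)
          else d
      | none => d) (PySem.Dict.mk row)).items)

-- ===== PORT B =====
-- B: precompute the column set and the keep length; one dict comprehension over each row's items.
def truncate_columns_alt (rows : List (List (String × String))) (columns : List String) (max_length : Int) (suffix : String) : List (List (String × String)) :=
  let col_set : PySem.Set String := PySem.Set.ofList columns
  let keep : Int := max (max_length - PySem.Str.len suffix) 0
  rows.map (fun row =>
    row.map (fun kv =>
      if PySem.Set.contains col_set kv.1 && PySem.Str.len kv.2 > max_length then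
        (kv.1, PySem.Str.slice kv.2 none (some keep) ++ suffix)
      else kv))

-- ===== PRECONDITION & SPEC =====
-- Pre_ excludes (i) max_length < 0, where the Python A raises ValueError on first iteration, and
-- (ii) rows whose association list repeats a key — those do not represent any Python dict, so the
-- model makes no claim about them.
def Pre_truncate_columns (rows : List (List (String × String))) (columns : List String) (max_length : Int) (suffix : String) : Prop :=
  0 ≤ max_length ∧ ∀ row ∈ rows, (row.map Prod.fst).Nodup
instance (rows : List (List (String × String))) (columns : List String) (max_length : Int) (suffix : String) : Decidable (Pre_truncate_columns rows columns max_length suffix) := by unfold Pre_truncate_columns; infer_instance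

def pvWitness_truncate_columns : (List (List (String × String))) × List String × Int × String :=
  ([[("a", "hello"), ("b", "hi")], [("a", "worlds")]], ["a", "c"], 3, ".")

def Spec_truncate_columns (rows : List (List (String × String))) (columns : List String) (max_length : Int) (suffix : String) (out : List (List (String × String))) : Prop := out = truncate_columns_alt rows columns max_length suffix
instance (rows : List (List (String × String))) (columns : List String) (max_length : Int) (suffix : String) (out : List (List (String × String))) : Decidable (Spec_truncate_columns rows columns max_length suffix out) := by unfold Spec_truncate_columns; infer_instance

-- ===== CLAIM (what is proved, stated in full; the proofs are below) =====
def Claim_equal_truncate_columns : Prop := ∀ (rows : List (List (String × String))) (columns : List String) (max_length : Int) (suffix : String), Dom_truncate_columns rows columns max_length suffix → Pre_truncate_columns rows columns max_length suffix → Spec_truncate_columns rows columns max_length suffix (truncate_columns rows columns max_length suffix)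

-- ===== LEMMAS AND PROOFS =====

-- The per-value truncation both programs apply.
def pvF (m : Int) (suffix : String) (v : String) : String :=
  if PySem.Str.len v > m then
    PySem.Str.slice v none (some (max (m - PySem.Str.len suffix) 0)) ++ suffix
  else v

-- A's loop body, named for the proofs.
def pvStep (m : Int) (suffix : String) (d : PySem.Dict String String) (col : String) : PySem.Dict String String :=
  match PySem.Dict.get? d col with
  | some val =>
      if PySem.Str.len val > m then
        let core := m - PySem.Str.len suffix
        PySem.Dict.insert d col (PySem.Str.slice val none (some (max core 0)) ++ suffix)
      else d
  | none => d

lemma pvF_toList (m : Int) (suffix v : String) :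
    (pvF m suffix v).toList =
      if (v.toList.length : Int) > m then
        v.toList.take (max (m - (suffix.toList.length : Int)) 0).toNat ++ suffix.toList
      else v.toList := by
  unfold pvF
  split_ifs with h h' h'
  · rw [String.toList_append]
    congr 1
    have hmax : (max (m - PySem.Str.len suffix) 0) = (((max (m - PySem.Str.len suffix) 0).toNat : Nat) : Int) := by
      omega
    rw [hmax, PySem.Str.toList_slice, PySem.Chars.slice_eq_listSlice, PySem.List.slice_to_natCast]
    simp [pysem]
  · exact absurd h (by simpa [pysem, PySem.Str.len_eq] using h')
  · exact absurd h' (by simpa [pysem, PySem.Str.len_eq] using h)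
  · rfl

-- Truncating an already-truncated value changes nothing.
lemma pvF_idem (m : Int) (suffix v : String) : pvF m suffix (pvF m suffix v) = pvF m suffix v := by
  apply String.toList_inj.mp
  rw [pvF_toList, pvF_toList]
  set k : Nat := (max (m - (suffix.toList.length : Int)) 0).toNat with hk
  by_cases h : (v.toList.length : Int) > m
  · simp only [if_pos h]
    by_cases h2 : (((v.toList.take k ++ suffix.toList).length : Nat) : Int) > m
    · rw [if_pos h2]
      have hlen : (v.toList.take k ++ suffix.toList).length = min v.toList.length k + suffix.toList.length := by
        simp [Nat.min_comm]
      by_cases hc : 0 ≤ m - (suffix.toList.length : Int)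
      · exfalso
        have hk2 : (k : Int) = m - suffix.toList.length := by omega
        rw [hlen] at h2
        have : (min v.toList.length k : Int) ≤ (k : Int) := by exact_mod_cast Nat.cast_le.mpr (Nat.min_le_right _ _)
        push_cast at h2
        omega
      · have hk0 : k = 0 := by omega
        simp [hk0]
    · rw [if_neg h2]
  · simp only [if_neg h]

-- One pass of A's loop body rewrites exactly the entries keyed by that column.
lemma pvStep_items (m : Int) (suffix : String) (c : String) (r : List (String × String))
    (hnd : (r.map Prod.fst).Nodup) :
    (pvStep m suffix (PySem.Dict.mk r) c).items =
      r.map (fun kv => if kv.1 = c then (kv.1, pvF m suffix kv.2) else kv) := by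
  unfold pvStep
  have hkeys : (PySem.Dict.mk r).keys = r.map Prod.fst := rfl
  cases hg : PySem.Dict.get? (PySem.Dict.mk r) c with
  | none =>
      dsimp only
      have hnc : c ∉ r.map Prod.fst := by
        have := (PySem.Dict.get?_eq_none_iff_not_mem_keys (d := PySem.Dict.mk r) (k := c)).mp hg
        simpa [hkeys] using this
      show r = r.map _
      symm
      trans r.map id
      · apply List.map_congr_left
        intro kv hkv
        have : kv.1 ≠ c := fun h => hnc (h ▸ List.mem_map_of_mem hkv)
        simp [this]
      · simp
  | some val =>
      dsimp only
      have hval : ∀ kv ∈ r, kv.1 = c → kv.2 = val := by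
        intro kv hkv hc
        have h1 : PySem.Dict.get? (PySem.Dict.mk r) kv.1 = some kv.2 := by
          apply PySem.Dict.get?_of_mem_items
          · exact hkv
          · exact hnd
        rw [hc, hg] at h1
        exact (Option.some.inj h1).symm
      by_cases hlen : PySem.Str.len val > m
      · rw [if_pos hlen]
        have hcont : (PySem.Dict.mk r).contains c = true := by
          rw [PySem.Dict.contains_eq_isSome_get?, hg]; rfl
        rw [PySem.Dict.items_insert_of_contains _ _ hcont]
        apply List.map_congr_left
        intro kv hkv
        by_cases hc : kv.1 = c
        · have hv := hval kv hkv hc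
          have hlen' : m < (val.length : Int) := by simpa [pysem] using hlen
          simp [hc, hv, pvF, hlen']
        · simp [hc, show (kv.1 == c) = false from beq_eq_false_iff_ne.mpr hc]
      · rw [if_neg hlen]
        show r = r.map _
        symm
        trans r.map id
        · apply List.map_congr_left
          intro kv hkv
          by_cases hc : kv.1 = c
          · have hv := hval kv hkv hc
            have hlen' : ¬ m < (val.length : Int) := by simpa [pysem] using hlen
            simp [hc, hv, pvF, hlen', Prod.ext_iff]
          · simp [hc]
        · simp

-- The whole column loop, characterised.
lemma pvFold_items (m : Int) (suffix : String) (cols : List String) (r : List (String × String))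
    (hnd : (r.map Prod.fst).Nodup) :
    (cols.foldl (pvStep m suffix) (PySem.Dict.mk r)).items =
      r.map (fun kv => if kv.1 ∈ cols then (kv.1, pvF m suffix kv.2) else kv) := by
  induction cols generalizing r with
  | nil => simp [show (PySem.Dict.mk r).items = r from rfl]
  | cons c cs ih =>
      have hstep : pvStep m suffix (PySem.Dict.mk r) c =
          PySem.Dict.mk (r.map (fun kv => if kv.1 = c then (kv.1, pvF m suffix kv.2) else kv)) := by
        apply PySem.Dict.ext
        exact pvStep_items m suffix c r hnd
      have hnd' : ((r.map (fun kv => if kv.1 = c then (kv.1, pvF m suffix kv.2) else kv)).map Prod.fst).Nodup := by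
        have : (r.map (fun kv => if kv.1 = c then (kv.1, pvF m suffix kv.2) else kv)).map Prod.fst
            = r.map Prod.fst := by
          rw [List.map_map]
          apply List.map_congr_left
          intro kv _
          by_cases hc : kv.1 = c <;> simp [hc]
        rw [this]; exact hnd
      rw [List.foldl_cons, hstep, ih _ hnd', List.map_map]
      apply List.map_congr_left
      intro kv _
      by_cases hc : kv.1 = c
      · by_cases hcs : kv.1 ∈ cs <;>
          simp [hc, Function.comp, pvF_idem]
      · by_cases hcs : kv.1 ∈ cs <;>
          simp [hc, hcs, Function.comp]

-- ===== VERDICT (by name: the statement is the Claim_ definition above) =====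
theorem truncate_columns_spec : Claim_equal_truncate_columns := by
  intro rows columns max_length suffix _hdom hpre
  unfold Spec_truncate_columns truncate_columns truncate_columns_alt
  apply List.map_congr_left
  intro row hrow
  have hnd := hpre.2 row hrow
  have : (fun (d : PySem.Dict String String) (col : String) =>
      match PySem.Dict.get? d col with
      | some val =>
          if PySem.Str.len val > max_length then
            let core := max_length - PySem.Str.len suffix
            PySem.Dict.insert d col (PySem.Str.slice val none (some (max core 0)) ++ suffix)
          else d
      | none => d) = pvStep max_length suffix := rfl
  rw [this, pvFold_items max_length suffix columns row hnd]
  apply List.map_congr_left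
  intro kv _
  by_cases hc : kv.1 ∈ columns
  · simp [hc, pvF, pysem]
    split_ifs with h
    · rfl
    · rfl
  · simp [hc, pysem]
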